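-- pv_equiv track=rewrite | github.com/kmccleary3301/breadboard | scripts/validate_phase4_footer_contract.py | _find_last_shortcuts_status_line
-- ===== SOURCE A (Python) =====
-- def _anchor_variants(anchor: str) -> list[str]:
--     token = str(anchor or "").strip()
--     if token in {"? for shortcuts", "? shortcuts"}:
--         return ["? for shortcuts", "? shortcuts"]
--     if token in {"Cooked for", "last"}:
--         return ["Cooked for", "last "]
--     return [token] if token else []
--
-- def _contains_anchor(text: str, anchor: str) -> bool:
--     return any(variant in text for variant in _anchor_variants(anchor))
--
-- def _find_last_shortcuts_status_line(
--     lines: list[str],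
--     shortcuts_anchor: str,
--     status_anchor: str,
-- ) -> int:
--     for idx in range(len(lines) - 1, -1, -1):
--         line = lines[idx]
--         if _contains_anchor(line, shortcuts_anchor) and _contains_anchor(line, status_anchor):
--             return idx
--     return -1
-- ===== SOURCE B (Python) =====
-- def _anchor_variants(anchor: str) -> list[str]:
--     token = str(anchor or "").strip()
--     if token in {"? for shortcuts", "? shortcuts"}:
--         return ["? for shortcuts", "? shortcuts"]
--     if token in {"Cooked for", "last"}:
--         return ["Cooked for", "last "]
--     return [token] if token else []
--
-- def _contains_anchor(text: str, anchor: str) -> bool: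
--     return any(variant in text for variant in _anchor_variants(anchor))
--
-- def _find_last_shortcuts_status_line(
--     lines: list[str],
--     shortcuts_anchor: str,
--     status_anchor: str,
-- ) -> int:
--     last = -1
--     for idx, line in enumerate(lines):
--         if _contains_anchor(line, shortcuts_anchor) and _contains_anchor(line, status_anchor):
--             last = idx
--     return last
-- ===== Notes on version B (the rewrite author's own statement) =====
-- stated objective: alternative
-- what changed: Replaced the backward range(len-1,-1,-1) scan with early return by a forward enumerate pass that accumulates the last matching index and returns it after the loop.
import Mathlib
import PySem

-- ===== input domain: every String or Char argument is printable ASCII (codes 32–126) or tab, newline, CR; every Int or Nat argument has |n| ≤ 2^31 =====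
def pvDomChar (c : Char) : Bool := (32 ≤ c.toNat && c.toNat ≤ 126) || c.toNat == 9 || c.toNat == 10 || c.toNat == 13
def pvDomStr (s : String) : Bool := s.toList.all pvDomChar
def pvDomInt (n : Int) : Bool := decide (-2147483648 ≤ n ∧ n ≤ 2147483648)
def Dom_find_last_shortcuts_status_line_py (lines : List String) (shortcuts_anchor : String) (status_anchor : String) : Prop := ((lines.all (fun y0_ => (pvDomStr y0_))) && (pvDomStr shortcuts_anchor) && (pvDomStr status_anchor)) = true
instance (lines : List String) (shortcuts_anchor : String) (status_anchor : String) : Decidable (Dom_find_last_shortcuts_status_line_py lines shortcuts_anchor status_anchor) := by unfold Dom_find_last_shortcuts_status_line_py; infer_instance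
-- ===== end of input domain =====

-- B replaces A's backward early-return scan by a forward enumerate pass accumulating the last matching index (alternative decomposition, same cost).
-- ===== PORT A =====
-- helper: _anchor_variants
def anchor_variants_py (anchor : String) : List String :=
  let token := PySem.Str.strip (if anchor == "" then "" else anchor)
  if token == "? for shortcuts" || token == "? shortcuts" then
    ["? for shortcuts", "? shortcuts"]
  else if token == "Cooked for" || token == "last" then
    ["Cooked for", "last "]
  else if token != "" then [token] else []

-- helper: _contains_anchor
def contains_anchor_py (text : String) (anchor : String) : Bool :=
  (anchor_variants_py anchor).any (fun variant => PySem.Str.isIn variant text)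

-- the backward 'for idx in range(len(lines)-1,-1,-1)' loop with early return;
-- every idx produced by the range is in bounds, so lines[idx] is pyGetD with any default
def fllA_loop (lines : List String) (shortcuts_anchor status_anchor : String) : List Int → Int
  | [] => -1
  | idx :: rest =>
    let line := PySem.List.pyGetD lines idx ""
    if contains_anchor_py line shortcuts_anchor && contains_anchor_py line status_anchor then idx
    else fllA_loop lines shortcuts_anchor status_anchor rest

def find_last_shortcuts_status_line_py (lines : List String) (shortcuts_anchor : String) (status_anchor : String) : Int :=
  fllA_loop lines shortcuts_anchor status_anchor
    (PySem.List.pyRange ((lines.length : Int) - 1) (-1) (-1))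


-- ===== PORT B =====
-- forward enumerate pass accumulating the last matching index
def find_last_shortcuts_status_line_py_alt (lines : List String) (shortcuts_anchor : String) (status_anchor : String) : Int :=
  (PySem.List.enumerate lines 0).foldl
    (fun last p =>
      if contains_anchor_py p.2 shortcuts_anchor && contains_anchor_py p.2 status_anchor then p.1
      else last)
    (-1)

-- ===== PRECONDITION & SPEC =====
def Spec_find_last_shortcuts_status_line_py (lines : List String) (shortcuts_anchor : String) (status_anchor : String) (out : Int) : Prop := out = find_last_shortcuts_status_line_py_alt lines shortcuts_anchor status_anchor
instance (lines : List String) (shortcuts_anchor : String) (status_anchor : String) (out : Int) : Decidable (Spec_find_last_shortcuts_status_line_py lines shortcuts_anchor status_anchor out) := by unfold Spec_find_last_shortcuts_status_line_py; infer_instance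

-- ===== CLAIM (what is proved, stated in full; the proofs are below) =====
def Claim_equal_find_last_shortcuts_status_line_py : Prop := ∀ (lines : List String) (shortcuts_anchor : String) (status_anchor : String), Dom_find_last_shortcuts_status_line_py lines shortcuts_anchor status_anchor → Spec_find_last_shortcuts_status_line_py lines shortcuts_anchor status_anchor (find_last_shortcuts_status_line_py lines shortcuts_anchor status_anchor)


-- ===== LEMMAS AND PROOFS =====
def linePred (shortcuts_anchor status_anchor : String) (line : String) : Bool :=
  contains_anchor_py line shortcuts_anchor && contains_anchor_py line status_anchor

theorem fllA_loop_append (l : List String) (x : String) (sa st : String)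
    (idxs : List Int) (h : ∀ i ∈ idxs, 0 ≤ i ∧ i < (l.length : Int)) :
    fllA_loop (l ++ [x]) sa st idxs = fllA_loop l sa st idxs := by
  induction idxs with
  | nil => rfl
  | cons i rest ih =>
    have hi := h i (List.mem_cons_self ..)
    obtain ⟨k, rfl⟩ : ∃ k : Nat, (k : Int) = i := ⟨i.toNat, Int.toNat_of_nonneg hi.1⟩
    have hk : k < l.length := by exact_mod_cast hi.2
    have hk' : k < (l ++ [x]).length := by simp; omega
    simp only [fllA_loop, PySem.List.pyGetD_natCast]
    rw [List.getD_eq_getElem?_getD, List.getD_eq_getElem?_getD, List.getElem?_append_left hk]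
    rw [ih (fun j hj => h j (List.mem_cons_of_mem _ hj))]

theorem altB_append (l : List String) (x : String) (sa st : String) :
    find_last_shortcuts_status_line_py_alt (l ++ [x]) sa st =
      if linePred sa st x then (l.length : Int)
      else find_last_shortcuts_status_line_py_alt l sa st := by
  unfold find_last_shortcuts_status_line_py_alt linePred
  rw [PySem.List.enumerate_append, List.foldl_append]
  simp [PySem.List.enumerate]

theorem portA_append (l : List String) (x : String) (sa st : String) :
    find_last_shortcuts_status_line_py (l ++ [x]) sa st =
      if linePred sa st x then (l.length : Int)
      else find_last_shortcuts_status_line_py l sa st := by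
  unfold find_last_shortcuts_status_line_py
  have hlen : ((l ++ [x]).length : Int) - 1 = (l.length : Int) := by simp
  rw [hlen, PySem.List.pyRange_neg_one_cons (by omega)]
  have hget : PySem.List.pyGetD (l ++ [x]) (l.length : Int) "" = x := by
    rw [PySem.List.pyGetD_natCast]
    simp [List.getD]
  simp only [fllA_loop, hget]
  unfold linePred
  split
  · rfl
  · rw [fllA_loop_append]
    intro i hi
    have := (PySem.List.mem_pyRange_neg_one).1 hi
    omega

-- ===== VERDICT (by name: the statement is the Claim_ definition above) =====
theorem find_last_shortcuts_status_line_py_spec : Claim_equal_find_last_shortcuts_status_line_py := by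
  intro lines sa st hd
  clear hd
  unfold Spec_find_last_shortcuts_status_line_py
  induction lines using List.reverseRecOn with
  | nil => rfl
  | append_singleton l x ih =>
    rw [portA_append, altB_append, ih]
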